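-- pv_equiv track=rewrite | github.com/hherb/biasbuster | cli/chunking.py | _break_at_boundary
-- ===== SOURCE A (Python) =====
-- def _break_at_boundary(text: str) -> str:
--     """Try to break text at a paragraph or sentence boundary near the end.
--
--     Looks backwards from the end for paragraph breaks (double newline),
--     then sentence-ending punctuation. Returns the text up to the boundary.
--     """
--     min_keep = len(text) * 3 // 4  # Don't throw away more than 25%
--
--     # Try paragraph break
--     last_para = text.rfind("\n\n", min_keep)
--     if last_para > 0:
--         return text[: last_para + 2]
--
--     # Try sentence break
--     for punct in (". ", ".\n", "? ", "! "):
--         last_sent = text.rfind(punct, min_keep)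
--         if last_sent > 0:
--             return text[: last_sent + len(punct)]
--
--     return text
-- ===== SOURCE B (Python) =====
-- def _break_at_boundary(text: str) -> str:
--     """Single forward pass: record the last index of each boundary pair in
--     text[min_keep:], then pick by the original priority order."""
--     n = len(text)
--     min_keep = n * 3 // 4  # Don't throw away more than 25%
--     last_para = -1
--     last_dot_sp = -1
--     last_dot_nl = -1
--     last_q = -1
--     last_ex = -1
--     for i in range(min_keep, n - 1):
--         pair = text[i:i + 2]
--         if pair == "\n\n":
--             last_para = i
--         elif pair == ". ":
--             last_dot_sp = i
--         elif pair == ".\n":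
--             last_dot_nl = i
--         elif pair == "? ":
--             last_q = i
--         elif pair == "! ":
--             last_ex = i
--     if last_para > 0:
--         return text[: last_para + 2]
--     for last in (last_dot_sp, last_dot_nl, last_q, last_ex):
--         if last > 0:
--             return text[: last + 2]
--     return text
-- ===== Notes on version B (the rewrite author's own statement) =====
-- stated objective: alternative
-- what changed: Replaces the five separate backward rfind scans with a single forward pass over text[min_keep:] that records the last index of each of the five boundary pairs in one loop, then selects a boundary in the original priority order.
import Mathlib
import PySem

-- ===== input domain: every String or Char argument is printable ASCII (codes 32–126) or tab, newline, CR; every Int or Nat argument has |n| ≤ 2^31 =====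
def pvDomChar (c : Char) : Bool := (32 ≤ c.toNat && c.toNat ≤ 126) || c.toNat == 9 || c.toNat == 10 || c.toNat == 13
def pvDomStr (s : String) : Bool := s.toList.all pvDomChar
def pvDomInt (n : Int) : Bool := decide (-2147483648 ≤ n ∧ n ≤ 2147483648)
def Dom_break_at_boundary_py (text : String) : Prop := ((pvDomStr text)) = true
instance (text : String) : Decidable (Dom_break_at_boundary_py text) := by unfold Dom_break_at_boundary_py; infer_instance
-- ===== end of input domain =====

-- B replaces the five backward rfind scans by one forward pass over text[min_keep:]
-- that records the last index of each boundary pair, then picks by the original priority order.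


-- ===== PORT A =====
-- the 'for punct in (...)' loop with its early returns
def break_tryPuncts (text : String) (min_keep : Int) : List String → String
  | [] => text
  | punct :: rest =>
      let last_sent := PySem.Str.rfindFrom text punct min_keep
      if last_sent > 0 then PySem.Str.slice text none (some (last_sent + PySem.Str.len punct))
      else break_tryPuncts text min_keep rest

def break_at_boundary_py (text : String) : String :=
  let min_keep := PySem.Int.floordiv (PySem.Str.len text * 3) 4
  let last_para := PySem.Str.rfindFrom text "\n\n" min_keep
  if last_para > 0 then PySem.Str.slice text none (some (last_para + 2))
  else break_tryPuncts text min_keep [". ", ".\n", "? ", "! "]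

-- ===== PORT B =====
-- loop body: classify text[i:i+2] and record i in the matching slot
def breakAltStep (text : String) (acc : Int × Int × Int × Int × Int) (i : Int) :
    Int × Int × Int × Int × Int :=
  let pair := PySem.Str.slice text (some i) (some (i + 2))
  if pair = "\n\n" then (i, acc.2.1, acc.2.2.1, acc.2.2.2.1, acc.2.2.2.2)
  else if pair = ". " then (acc.1, i, acc.2.2.1, acc.2.2.2.1, acc.2.2.2.2)
  else if pair = ".\n" then (acc.1, acc.2.1, i, acc.2.2.2.1, acc.2.2.2.2)
  else if pair = "? " then (acc.1, acc.2.1, acc.2.2.1, i, acc.2.2.2.2)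
  else if pair = "! " then (acc.1, acc.2.1, acc.2.2.1, acc.2.2.2.1, i)
  else acc

def break_at_boundary_py_alt (text : String) : String :=
  let n := PySem.Str.len text
  let min_keep := PySem.Int.floordiv (n * 3) 4
  let r := (PySem.List.pyRange min_keep (n - 1)).foldl (breakAltStep text) (-1, -1, -1, -1, -1)
  if r.1 > 0 then PySem.Str.slice text none (some (r.1 + 2))
  else if r.2.1 > 0 then PySem.Str.slice text none (some (r.2.1 + 2))
  else if r.2.2.1 > 0 then PySem.Str.slice text none (some (r.2.2.1 + 2))
  else if r.2.2.2.1 > 0 then PySem.Str.slice text none (some (r.2.2.2.1 + 2))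
  else if r.2.2.2.2 > 0 then PySem.Str.slice text none (some (r.2.2.2.2 + 2))
  else text

-- ===== PRECONDITION & SPEC =====
def Spec_break_at_boundary_py (text : String) (out : String) : Prop := out = break_at_boundary_py_alt text
instance (text : String) (out : String) : Decidable (Spec_break_at_boundary_py text out) := by unfold Spec_break_at_boundary_py; infer_instance

-- ===== CLAIM (what is proved, stated in full; the proofs are below) =====
def Claim_equal_break_at_boundary_py : Prop := ∀ (text : String), Dom_break_at_boundary_py text → Spec_break_at_boundary_py text (break_at_boundary_py text)

-- ===== LEMMAS AND PROOFS =====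

def mstep (text sub : String) (acc i : Int) : Int :=
  if PySem.Str.slice text (some i) (some (i + 2)) = sub then i else acc

theorem go_zero (s sub : List Char) :
    PySem.Chars.rfind.go s sub 0 = if sub.isPrefixOf s then 0 else -1 := rfl

theorem go_succ (s sub : List Char) (j : Nat) :
    PySem.Chars.rfind.go s sub (j + 1) =
      if sub.isPrefixOf (s.drop (j + 1)) then ((j : Int) + 1)
      else PySem.Chars.rfind.go s sub j := by
  show (if sub.isPrefixOf (s.drop (j+1)) then ((j+1 : Nat) : Int) else PySem.Chars.rfind.go s sub j) = _
  push_cast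
  rfl

theorem go_no (s sub : List Char) (j : Nat) (h : ¬ sub <+: s.drop (j + 1)) :
    PySem.Chars.rfind.go s sub (j + 1) = PySem.Chars.rfind.go s sub j := by
  rw [go_succ]
  simp [List.isPrefixOf_iff_prefix, h]

theorem go_short (s sub : List Char) (j : Nat) (h : (s.drop (j+1)).length < sub.length) :
    PySem.Chars.rfind.go s sub (j + 1) = PySem.Chars.rfind.go s sub j := by
  refine go_no s sub j (fun hp => ?_)
  exact absurd hp.length_le (by omega)

theorem match_iff (text sub : String) (hsub : sub.toList.length = 2) (k : Nat) :
    (PySem.Str.slice text (some (k : Int)) (some ((k : Int) + 2)) = sub) ↔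
      sub.toList <+: text.toList.drop k := by
  rw [← String.toList_inj, PySem.Str.toList_slice, PySem.Chars.slice_eq_listSlice]
  have h2 : ((k : Int) + 2) = ((k + 2 : Nat) : Int) := by push_cast; ring
  rw [h2, PySem.List.slice_natCast]
  have h3 : k + 2 - k = 2 := by omega
  rw [h3, List.prefix_iff_eq_take, hsub]
  constructor <;> intro h <;> exact h.symm

theorem fold_eq_go (text sub : String) (hsub : sub.toList.length = 2) (st : Nat) (k : Nat) :
    (PySem.List.pyRange (st : Int) ((st : Int) + k + 1)).foldl (mstep text sub) (-1) =
      (if PySem.Chars.rfind.go (text.toList.drop st) sub.toList k = -1 then (-1 : Int)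
       else (st : Int) + PySem.Chars.rfind.go (text.toList.drop st) sub.toList k) := by
  induction k with
  | zero =>
    simp only [Nat.cast_zero, add_zero]
    have h1 : PySem.List.pyRange (st : Int) ((st : Int) + 1) = [(st : Int)] := by
      rw [PySem.List.pyRange_one_cons (by omega)]
      simp [PySem.List.pyRange]
    rw [h1]
    simp only [List.foldl_cons, List.foldl_nil, mstep]
    rw [go_zero]
    by_cases hp : sub.toList <+: text.toList.drop st
    · rw [if_pos ((match_iff text sub hsub st).2 hp)]
      simp [List.isPrefixOf_iff_prefix, hp]
    · rw [if_neg (fun hc => hp ((match_iff text sub hsub st).1 hc))]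
      simp [List.isPrefixOf_iff_prefix, hp]
  | succ k ih =>
    simp only [Nat.cast_add, Nat.cast_one]
    have hb : ((st : Int) + (k + 1) + 1) = ((st : Int) + k + 1) + 1 := by omega
    rw [hb, PySem.List.pyRange_one_succ_right (by omega), List.foldl_append]
    simp only [List.foldl_cons, List.foldl_nil]
    have hidx : ((st : Int) + k + 1) = ((st + k + 1 : Nat) : Int) := by omega
    have hdd : text.toList.drop (st + k + 1) = (text.toList.drop st).drop (k + 1) := by
      rw [List.drop_drop]
      congr 1
    by_cases hp : sub.toList <+: (text.toList.drop st).drop (k + 1)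
    · have hm : PySem.Str.slice text (some ((st : Int) + k + 1)) (some ((st : Int) + k + 1 + 2)) = sub := by
        rw [hidx]
        exact (match_iff text sub hsub (st + k + 1)).2 (by rw [hdd]; exact hp)
      rw [mstep, if_pos hm, go_succ]
      rw [if_pos (List.isPrefixOf_iff_prefix.2 hp)]
      rw [if_neg (by omega)]
      omega
    · have hm : ¬ (PySem.Str.slice text (some ((st : Int) + k + 1)) (some ((st : Int) + k + 1 + 2)) = sub) := by
        rw [hidx]
        exact fun hc => hp (by rw [← hdd]; exact (match_iff text sub hsub (st + k + 1)).1 hc)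
      rw [mstep, if_neg hm, go_no _ _ _ hp]
      exact ih

theorem pyRange_one_nil (a b : Int) (h : b ≤ a) : PySem.List.pyRange a b = [] := by
  simp [PySem.List.pyRange, h]

theorem not_prefix_short (sub l : List Char) (h : l.length < sub.length) : ¬ sub <+: l :=
  fun hp => absurd hp.length_le (by omega)

theorem fold_eq_rfindFrom (text sub : String) (hsub : sub.toList.length = 2) (st : Nat)
    (hst : st ≤ text.toList.length) :
    (PySem.List.pyRange (st : Int) ((text.toList.length : Int) - 1)).foldl (mstep text sub) (-1) =
      PySem.Str.rfindFrom text sub (st : Int) := by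
  have hrhs : PySem.Str.rfindFrom text sub (st : Int) =
      (if PySem.Chars.rfind.go (text.toList.drop st) sub.toList (text.toList.length - st) = -1 then (-1 : Int)
       else (st : Int) + PySem.Chars.rfind.go (text.toList.drop st) sub.toList (text.toList.length - st)) := by
    rw [PySem.Str.rfindFrom_eq]
    simp only [PySem.Chars.rfindFrom, PySem.Chars.rfind]
    rw [if_neg (by omega : ¬ ((st : Int) < 0))]
    rw [if_neg (by omega : ¬ ((text.toList.length : Int) < (st : Int)))]
    simp only [Int.toNat_natCast, List.take_length, List.length_drop]
  rw [hrhs]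
  by_cases hm : st + 2 ≤ text.toList.length
  · have hk : ((text.toList.length : Int) - 1) = (st : Int) + (text.toList.length - st - 2 : Nat) + 1 := by
      omega
    rw [hk, fold_eq_go text sub hsub st (text.toList.length - st - 2)]
    have hg : PySem.Chars.rfind.go (text.toList.drop st) sub.toList (text.toList.length - st) =
        PySem.Chars.rfind.go (text.toList.drop st) sub.toList (text.toList.length - st - 2) := by
      obtain ⟨a, ha⟩ : ∃ a, text.toList.length - st = a + 2 := ⟨text.toList.length - st - 2, by omega⟩
      rw [ha, Nat.add_sub_cancel, show a + 2 = a + 1 + 1 from rfl,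
        go_short _ _ _ (by rw [List.length_drop, List.length_drop, hsub]; omega),
        go_short _ _ _ (by rw [List.length_drop, List.length_drop, hsub]; omega)]
    rw [hg]
  · have hempty : PySem.List.pyRange (st : Int) ((text.toList.length : Int) - 1) = [] :=
      pyRange_one_nil _ _ (by omega)
    rw [hempty]
    simp only [List.foldl_nil]
    have hg : PySem.Chars.rfind.go (text.toList.drop st) sub.toList (text.toList.length - st) = -1 := by
      have h0 : ¬ sub.toList <+: text.toList.drop st :=
        not_prefix_short _ _ (by simp only [List.length_drop, hsub]; omega)
      rcases (by omega : text.toList.length - st = 0 ∨ text.toList.length - st = 1) with h | h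
      · rw [h, go_zero, if_neg (by simp [List.isPrefixOf_iff_prefix, h0])]
      · rw [h, go_no _ _ _ (not_prefix_short _ _ (by simp only [List.length_drop, hsub]; omega)),
          go_zero, if_neg (by simp [List.isPrefixOf_iff_prefix, h0])]
    rw [hg]
    simp

theorem step_eq (text : String) (a b c d e : Int) (x : Int) :
    breakAltStep text (a, b, c, d, e) x =
      (mstep text "\n\n" a x, mstep text ". " b x, mstep text ".\n" c x,
       mstep text "? " d x, mstep text "! " e x) := by
  simp only [breakAltStep, mstep]
  split_ifs <;> simp_all

theorem fold_split (text : String) (xs : List Int) (a b c d e : Int) :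
    xs.foldl (breakAltStep text) (a, b, c, d, e) =
      (xs.foldl (mstep text "\n\n") a, xs.foldl (mstep text ". ") b,
       xs.foldl (mstep text ".\n") c, xs.foldl (mstep text "? ") d,
       xs.foldl (mstep text "! ") e) := by
  induction xs generalizing a b c d e with
  | nil => rfl
  | cons x xs ih =>
    simp only [List.foldl_cons, step_eq]
    exact ih _ _ _ _ _

theorem len_punct_dot_sp : PySem.Str.len ". " = 2 := rfl
theorem len_punct_dot_nl : PySem.Str.len ".\n" = 2 := rfl
theorem len_punct_q : PySem.Str.len "? " = 2 := rfl
theorem len_punct_ex : PySem.Str.len "! " = 2 := rfl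

-- ===== VERDICT (by name: the statement is the Claim_ definition above) =====
theorem break_at_boundary_py_spec : Claim_equal_break_at_boundary_py := by
  intro text _
  unfold Spec_break_at_boundary_py
  have hst : text.toList.length * 3 / 4 ≤ text.toList.length := by omega
  have hmk : PySem.Int.floordiv ((text.toList.length : Int) * 3) 4 =
      ((text.toList.length * 3 / 4 : Nat) : Int) := by
    have h3 : ((text.toList.length : Int) * 3) = ((text.toList.length * 3 : Nat) : Int) := by
      push_cast; ring
    rw [h3]
    exact_mod_cast PySem.Int.floordiv_natCast (text.toList.length * 3) 4
  simp only [break_at_boundary_py, break_at_boundary_py_alt, break_tryPuncts]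
  rw [len_punct_dot_sp, len_punct_dot_nl, len_punct_q, len_punct_ex]
  rw [PySem.Str.len_eq, hmk, fold_split]
  rw [fold_eq_rfindFrom text "\n\n" rfl _ hst, fold_eq_rfindFrom text ". " rfl _ hst,
    fold_eq_rfindFrom text ".\n" rfl _ hst, fold_eq_rfindFrom text "? " rfl _ hst,
    fold_eq_rfindFrom text "! " rfl _ hst]
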